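-- pv_equiv track=rewrite | github.com/CheonUHee/Studying | 멀티미디어공학/jpeg_quantization.py | blocks_to_1D
-- ===== SOURCE A (Python) =====
-- def blocks_to_1D(blocks, height, width, block_size=8):
--     data = [0] * (height * width)
--     block_index = 0
--
--     for by in range(0, height, block_size):
--         for bx in range(0, width, block_size):
--             block = blocks[block_index]
--             block_index += 1
--             for y in range(block_size):
--                 for x in range(block_size):
--                     data[(by + y) * width + (bx + x)] = block[y][x]
--
--     return data
-- ===== SOURCE B (Python) =====
-- def blocks_to_1D(blocks, height, width, block_size=8):
--     if height <= 0 or width <= 0: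
--         return []
--     wb = width // block_size
--     return [blocks[(i // width // block_size) * wb + (i % width) // block_size]
--                   [(i // width) % block_size]
--                   [(i % width) % block_size]
--             for i in range(height * width)]
-- ===== Notes on version B (the rewrite author's own statement) =====
-- stated objective: alternative
-- what changed: A preallocates a flat zero buffer and scatters every block into it with a quadruple nested loop and a running block counter; B builds the output in one pass over the flat output indices, gathering each pixel directly from its block by div/mod index arithmetic (with a natural early return of [] for empty images).
-- outside the precondition, e.g. on blocks_to_1D([], -2, -3, 8): A returns [0, 0, 0, 0, 0, 0], B returns []
import Mathlib
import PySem

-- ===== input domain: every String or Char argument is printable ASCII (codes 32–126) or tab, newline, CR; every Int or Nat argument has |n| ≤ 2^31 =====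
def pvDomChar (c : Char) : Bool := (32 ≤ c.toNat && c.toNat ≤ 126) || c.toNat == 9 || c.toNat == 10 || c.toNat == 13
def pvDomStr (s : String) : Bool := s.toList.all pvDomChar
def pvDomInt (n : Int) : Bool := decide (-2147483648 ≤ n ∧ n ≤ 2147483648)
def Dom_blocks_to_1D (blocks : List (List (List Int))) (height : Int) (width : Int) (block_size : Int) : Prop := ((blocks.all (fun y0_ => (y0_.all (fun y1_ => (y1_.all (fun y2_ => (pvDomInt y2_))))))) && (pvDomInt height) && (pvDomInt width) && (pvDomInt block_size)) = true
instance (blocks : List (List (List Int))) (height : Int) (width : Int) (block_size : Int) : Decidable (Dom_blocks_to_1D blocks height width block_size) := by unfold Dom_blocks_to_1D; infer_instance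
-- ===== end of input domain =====

-- B replaces A's preallocated buffer and quadruple nested block-walk with a single
-- closed-form gather (plus a natural empty-image early return): one pass over the
-- output indices, each pixel fetched from its block by index arithmetic (alternative).

-- ===== PORT A =====
-- pyGetD / pySetD are exact where the index is in range, which Pre_ guarantees
-- (Python raises IndexError outside that range).
def blocks_to_1D (blocks : List (List (List Int))) (height : Int) (width : Int) (block_size : Int) : List Int :=
  let data : List Int := List.replicate (height * width).toNat 0
  (((PySem.List.pyRange 0 height block_size).foldl (fun (st : List Int × Int) by_ =>
      (PySem.List.pyRange 0 width block_size).foldl (fun (st : List Int × Int) bx =>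
        let block := PySem.List.pyGetD blocks st.2 []
        ((PySem.List.pyRange 0 block_size 1).foldl (fun (d : List Int) y =>
            (PySem.List.pyRange 0 block_size 1).foldl (fun (d : List Int) x =>
              PySem.List.pySetD d ((by_ + y) * width + (bx + x))
                (PySem.List.pyGetD (PySem.List.pyGetD block y []) x 0)) d) st.1,
         st.2 + 1)) st) (data, 0)) : List Int × Int).1

-- ===== PORT B =====
def blocks_to_1D_alt (blocks : List (List (List Int))) (height : Int) (width : Int) (block_size : Int) : List Int :=
  if height ≤ 0 ∨ width ≤ 0 then [] else
  let wb := PySem.Int.floordiv width block_size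
  (PySem.List.pyRange 0 (height * width) 1).map (fun i =>
    PySem.List.pyGetD (PySem.List.pyGetD (PySem.List.pyGetD blocks
        (PySem.Int.floordiv (PySem.Int.floordiv i width) block_size * wb
          + PySem.Int.floordiv (PySem.Int.mod i width) block_size) [])
      (PySem.Int.mod (PySem.Int.floordiv i width) block_size) [])
    (PySem.Int.mod (PySem.Int.mod i width) block_size) 0)

-- ===== PRECONDITION & SPEC =====
-- Pre_ covers the natural domain of block reassembly (a positive block_size dividing
-- both positive dimensions, with enough blocks of at least block_size × block_size
-- shape) together with the crash-free empty-image corners (a dimension ≤ 0 with the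
-- other ≥ 0, any nonzero step), where A returns its empty untouched buffer and B
-- returns []. Excluded inputs on which A still returns (both dimensions negative, or
-- a negative block_size with positive dimensions) only ever yield A's untouched
-- zero-filled buffer, an accident of Python's empty ranges outside the intended domain.
def Pre_blocks_to_1D (blocks : List (List (List Int))) (height : Int) (width : Int) (block_size : Int) : Prop :=
  block_size ≠ 0 ∧
    ((height ≤ 0 ∧ 0 ≤ width) ∨ (0 ≤ height ∧ width ≤ 0) ∨
      (0 < block_size ∧ 0 < height ∧ 0 < width ∧
        block_size ∣ height ∧ block_size ∣ width ∧
        (height.toNat / block_size.toNat) * (width.toNat / block_size.toNat) ≤ blocks.length ∧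
        ∀ b ∈ blocks.take ((height.toNat / block_size.toNat) * (width.toNat / block_size.toNat)),
          block_size.toNat ≤ b.length ∧ ∀ r ∈ b.take block_size.toNat, block_size.toNat ≤ r.length))
instance (blocks : List (List (List Int))) (height : Int) (width : Int) (block_size : Int) : Decidable (Pre_blocks_to_1D blocks height width block_size) := by unfold Pre_blocks_to_1D; infer_instance

def pvWitness_blocks_to_1D : List (List (List Int)) × Int × Int × Int := ([[[1, 2], [3, 4]]], 2, 2, 2)

def Spec_blocks_to_1D (blocks : List (List (List Int))) (height : Int) (width : Int) (block_size : Int) (out : List Int) : Prop := out = blocks_to_1D_alt blocks height width block_size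
instance (blocks : List (List (List Int))) (height : Int) (width : Int) (block_size : Int) (out : List Int) : Decidable (Spec_blocks_to_1D blocks height width block_size out) := by unfold Spec_blocks_to_1D; infer_instance

-- ===== CLAIM (what is proved, stated in full; the proofs are below) =====
def Claim_equal_blocks_to_1D : Prop := ∀ (blocks : List (List (List Int))) (height : Int) (width : Int) (block_size : Int), Dom_blocks_to_1D blocks height width block_size → Pre_blocks_to_1D blocks height width block_size → Spec_blocks_to_1D blocks height width block_size (blocks_to_1D blocks height width block_size)

-- ===== LEMMAS AND PROOFS =====

-- the pixel B gathers for flat output index p (wbN * sN is the row width)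
def pvPix (blocks : List (List (List Int))) (wbN sN : Nat) (p : Nat) : Int :=
  PySem.List.pyGetD (PySem.List.pyGetD (PySem.List.pyGetD blocks
      ((p / (wbN * sN) / sN * wbN + p % (wbN * sN) / sN : Nat) : Int) [])
    ((p / (wbN * sN) % sN : Nat) : Int) [])
  ((p % (wbN * sN) % sN : Nat) : Int) 0

theorem foldl_fixed' {α β : Type} (l : List α) (s : β) : l.foldl (fun s _ => s) s = s := by
  induction l generalizing s with
  | nil => rfl
  | cons a t ih => simp [ih]

theorem pyRange_mul (n s : Nat) (hs : 0 < s) :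
    PySem.List.pyRange 0 ((n * s : Nat) : Int) (s : Int) =
      List.map (fun k : Nat => ((k * s : Nat) : Int)) (List.range n) := by
  rw [PySem.List.pyRange_of_pos _ _ (by exact_mod_cast hs)]
  have hcnt : (if (0 : Int) < ((n * s : Nat) : Int) then ((((n * s : Nat) : Int) - 0 + s - 1) / s).toNat else 0) = n := by
    rcases Nat.eq_zero_or_pos n with h0 | hn
    · subst h0; simp
    · rw [if_pos (by exact_mod_cast Nat.mul_pos hn hs)]
      have h1 : (((n * s : Nat) : Int) - 0 + s - 1) = ((n * s + (s - 1) : Nat) : Int) := by omega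
      rw [h1, ← Int.natCast_div, Int.toNat_natCast,
        show n * s + (s - 1) = s * n + (s - 1) by ring, Nat.mul_add_div hs,
        Nat.div_eq_of_lt (by omega)]
      omega
  rw [hcnt]
  apply List.map_congr_left
  intro k _
  push_cast; ring

theorem pyRange_cast (s : Nat) :
    PySem.List.pyRange 0 (s : Int) 1 = List.map (fun y : Nat => (y : Int)) (List.range s) := by
  rw [PySem.List.pyRange_one]
  simp only [sub_zero, Int.toNat_natCast, zero_add]

theorem foldl_counter_row (G : List Int → Int → Nat → List Int) :
    ∀ (m : Nat) (d : List Int) (c : Int),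
      (List.range m).foldl (fun (st : List Int × Int) (j : Nat) => (G st.1 st.2 j, st.2 + 1)) (d, c)
        = ((List.range m).foldl (fun (d : List Int) (j : Nat) => G d (c + (j : Int)) j) d, c + (m : Int)) := by
  intro m
  induction m with
  | zero => intro d c; simp
  | succ m ih =>
    intro d c
    rw [List.range_succ, List.foldl_append, List.foldl_append, ih]
    simp only [List.foldl_cons, List.foldl_nil, Prod.mk.injEq]
    exact ⟨trivial, by push_cast; ring⟩

theorem foldl_counter_grid (G : List Int → Int → Nat → Nat → List Int) (wbN : Nat) :
    ∀ (hbN : Nat) (d : List Int) (c : Int),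
      (List.range hbN).foldl (fun (st : List Int × Int) (k : Nat) =>
          (List.range wbN).foldl (fun (st : List Int × Int) (j : Nat) => (G st.1 st.2 k j, st.2 + 1)) st) (d, c)
        = ((List.range hbN).foldl (fun (d : List Int) (k : Nat) =>
            (List.range wbN).foldl (fun (d : List Int) (j : Nat) => G d (c + ((k * wbN + j : Nat) : Int)) k j) d) d, c + ((hbN * wbN : Nat) : Int)) := by
  intro hbN
  induction hbN with
  | zero => intro d c; simp
  | succ m ih =>
    intro d c
    rw [List.range_succ, List.foldl_append, List.foldl_append, ih]
    simp only [List.foldl_cons, List.foldl_nil]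
    rw [foldl_counter_row (fun d c j => G d c m j)]
    simp only [Prod.mk.injEq]
    refine ⟨?_, by push_cast; ring⟩
    rw [show (fun (d : List Int) (j : Nat) => G d (c + ((m * wbN : Nat) : Int) + (j : Int)) m j)
        = (fun (d : List Int) (j : Nat) => G d (c + ((m * wbN + j : Nat) : Int)) m j) from
      funext fun d => funext fun j => by congr 1; push_cast; ring]

theorem foldl_pySetD_graph (f : Nat → Int) :
    ∀ (ws : List (Int × Int)) (d : List Int),
      (∀ iv ∈ ws, 0 ≤ iv.1 ∧ iv.1.toNat < d.length ∧ iv.2 = f iv.1.toNat) →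
      ∀ (p : Nat),
        (ws.foldl (fun d iv => PySem.List.pySetD d iv.1 iv.2) d)[p]? =
          if (∃ iv ∈ ws, iv.1.toNat = p) then some (f p) else d[p]? := by
  intro ws
  induction ws with
  | nil => intro d _ p; simp
  | cons iv t ih =>
    intro d hcond p
    obtain ⟨h0, hlt, hval⟩ := hcond iv (by simp)
    have hlen : (PySem.List.pySetD d iv.1 iv.2).length = d.length := PySem.List.length_pySetD _ _ _
    have hcond' : ∀ jv ∈ t, 0 ≤ jv.1 ∧ jv.1.toNat < (PySem.List.pySetD d iv.1 iv.2).length ∧ jv.2 = f jv.1.toNat := by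
      intro jv hjv
      obtain ⟨a, b, c⟩ := hcond jv (by simp [hjv])
      exact ⟨a, by omega, c⟩
    rw [List.foldl_cons, ih _ hcond' p]
    rw [PySem.List.pySetD_of_nonneg _ _ h0]
    by_cases hmem : ∃ jv ∈ t, jv.1.toNat = p
    · rw [if_pos hmem, if_pos (by simp [hmem])]
    · rw [if_neg hmem]
      by_cases hp : iv.1.toNat = p
      · rw [if_pos (by simp [hp]), List.getElem?_set, if_pos hp, if_pos (by omega), hval, hp]
      · rw [if_neg (by simp [hp, hmem]), List.getElem?_set, if_neg hp]

-- the list of (flat index, value) writes A performs, in A's order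
def wEntries (blocks : List (List (List Int))) (hbN wbN sN : Nat) : List (Int × Int) :=
  (List.range hbN).flatMap (fun (k : Nat) => (List.range wbN).flatMap (fun (j : Nat) =>
    (List.range sN).flatMap (fun (y : Nat) => (List.range sN).map (fun (x : Nat) =>
      ((((k * sN : Nat) : Int) + (y : Int)) * ((wbN * sN : Nat) : Int) + (((j * sN : Nat) : Int) + (x : Int)),
       PySem.List.pyGetD (PySem.List.pyGetD (PySem.List.pyGetD blocks (0 + ((k * wbN + j : Nat) : Int)) []) (y : Int) []) (x : Int) 0)))))

theorem wEntries_cond (blocks : List (List (List Int))) (hbN wbN sN : Nat) (hs : 0 < sN) :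
    ∀ iv ∈ wEntries blocks hbN wbN sN, 0 ≤ iv.1 ∧ iv.1.toNat < hbN * sN * (wbN * sN) ∧
      iv.2 = pvPix blocks wbN sN iv.1.toNat := by
  intro iv hiv
  obtain ⟨k, hk, hiv⟩ := List.mem_flatMap.1 hiv
  obtain ⟨j, hj, hiv⟩ := List.mem_flatMap.1 hiv
  obtain ⟨y, hy, hiv⟩ := List.mem_flatMap.1 hiv
  obtain ⟨x, hx, hiv⟩ := List.mem_map.1 hiv
  rw [List.mem_range] at hk hj hy hx
  subst hiv
  have hw : 0 < wbN * sN := Nat.mul_pos (by omega) hs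
  have he : ((((k * sN : Nat) : Int) + (y : Int)) * ((wbN * sN : Nat) : Int) + (((j * sN : Nat) : Int) + (x : Int)))
      = (((k * sN + y) * (wbN * sN) + (j * sN + x) : Nat) : Int) := by push_cast; ring
  have hr : j * sN + x < wbN * sN := by
    calc j * sN + x < j * sN + sN := by omega
    _ = (j + 1) * sN := by ring
    _ ≤ wbN * sN := Nat.mul_le_mul_right _ (by omega)
  have hN : (k * sN + y) * (wbN * sN) + (j * sN + x) < hbN * sN * (wbN * sN) := by
    calc (k * sN + y) * (wbN * sN) + (j * sN + x) < (k * sN + y) * (wbN * sN) + wbN * sN := by omega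
    _ = (k * sN + y + 1) * (wbN * sN) := by ring
    _ ≤ hbN * sN * (wbN * sN) := Nat.mul_le_mul_right _ (by
        calc k * sN + y + 1 ≤ k * sN + sN := by omega
        _ = (k + 1) * sN := by ring
        _ ≤ hbN * sN := Nat.mul_le_mul_right _ (by omega))
  refine ⟨by positivity, by rw [he, Int.toNat_natCast]; exact hN, ?_⟩
  simp only [he, Int.toNat_natCast]
  have hdiv : ((k * sN + y) * (wbN * sN) + (j * sN + x)) / (wbN * sN) = k * sN + y := by
    rw [show (k * sN + y) * (wbN * sN) + (j * sN + x) = (wbN * sN) * (k * sN + y) + (j * sN + x) by ring,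
      Nat.mul_add_div hw, Nat.div_eq_of_lt hr]
    omega
  have hmod : ((k * sN + y) * (wbN * sN) + (j * sN + x)) % (wbN * sN) = j * sN + x := by
    rw [show (k * sN + y) * (wbN * sN) + (j * sN + x) = (wbN * sN) * (k * sN + y) + (j * sN + x) by ring,
      Nat.mul_add_mod, Nat.mod_eq_of_lt hr]
  have d1 : (k * sN + y) / sN = k := by
    rw [show k * sN + y = sN * k + y by ring, Nat.mul_add_div hs, Nat.div_eq_of_lt hy]; omega
  have m1 : (k * sN + y) % sN = y := by
    rw [show k * sN + y = sN * k + y by ring, Nat.mul_add_mod, Nat.mod_eq_of_lt hy]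
  have d2 : (j * sN + x) / sN = j := by
    rw [show j * sN + x = sN * j + x by ring, Nat.mul_add_div hs, Nat.div_eq_of_lt hx]; omega
  have m2 : (j * sN + x) % sN = x := by
    rw [show j * sN + x = sN * j + x by ring, Nat.mul_add_mod, Nat.mod_eq_of_lt hx]
  simp [pvPix, hdiv, hmod, d1, m1, d2, m2]

theorem wEntries_cover (blocks : List (List (List Int))) (hbN wbN sN : Nat) (hs : 0 < sN)
    (p : Nat) (hp : p < hbN * sN * (wbN * sN)) :
    ∃ iv ∈ wEntries blocks hbN wbN sN, iv.1.toNat = p := by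
  have hw : 0 < wbN * sN := by
    rcases Nat.eq_zero_or_pos (wbN * sN) with h | h
    · rw [h, Nat.mul_zero] at hp; omega
    · exact h
  have hrow : p / (wbN * sN) < hbN * sN := (Nat.div_lt_iff_lt_mul hw).2 hp
  have hcol : p % (wbN * sN) < wbN * sN := Nat.mod_lt _ hw
  set q := p / (wbN * sN) with hq
  set r := p % (wbN * sN) with hr
  refine ⟨(((((q / sN) * sN : Nat) : Int) + ((q % sN : Nat) : Int)) * ((wbN * sN : Nat) : Int)
      + ((((r / sN) * sN : Nat) : Int) + ((r % sN : Nat) : Int)),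
      PySem.List.pyGetD (PySem.List.pyGetD (PySem.List.pyGetD blocks
        (0 + (((q / sN) * wbN + r / sN : Nat) : Int)) []) ((q % sN : Nat) : Int) []) ((r % sN : Nat) : Int) 0), ?_, ?_⟩
  · apply List.mem_flatMap.2
    refine ⟨q / sN, List.mem_range.2 ((Nat.div_lt_iff_lt_mul hs).2 hrow), ?_⟩
    apply List.mem_flatMap.2
    refine ⟨r / sN, List.mem_range.2 ((Nat.div_lt_iff_lt_mul hs).2 hcol), ?_⟩
    apply List.mem_flatMap.2
    refine ⟨q % sN, List.mem_range.2 (Nat.mod_lt _ hs), ?_⟩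
    exact List.mem_map.2 ⟨r % sN, List.mem_range.2 (Nat.mod_lt _ hs), rfl⟩
  · have h1 : q / sN * sN + q % sN = q := by rw [Nat.mul_comm]; exact Nat.div_add_mod _ _
    have h2 : r / sN * sN + r % sN = r := by rw [Nat.mul_comm]; exact Nat.div_add_mod _ _
    have h3 : q * (wbN * sN) + r = p := by rw [Nat.mul_comm]; exact Nat.div_add_mod p (wbN * sN)
    have : (((q / sN * sN : Nat) : Int) + ((q % sN : Nat) : Int)) * ((wbN * sN : Nat) : Int)
        + (((r / sN * sN : Nat) : Int) + ((r % sN : Nat) : Int)) = ((p : Nat) : Int) := by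
      have e : (((q / sN * sN : Nat) : Int) + ((q % sN : Nat) : Int)) * ((wbN * sN : Nat) : Int)
          + (((r / sN * sN : Nat) : Int) + ((r % sN : Nat) : Int))
          = (((q / sN * sN + q % sN) * (wbN * sN) + (r / sN * sN + r % sN) : Nat) : Int) := by
        push_cast; ring
      rw [e, h1, h2, h3]
    simp only [this, Int.toNat_natCast]

theorem A_eq_gather (blocks : List (List (List Int))) (hbN wbN sN : Nat) (hs : 0 < sN) :
    blocks_to_1D blocks ((hbN * sN : Nat) : Int) ((wbN * sN : Nat) : Int) ((sN : Nat) : Int)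
      = (List.range (hbN * sN * (wbN * sN))).map (pvPix blocks wbN sN) := by
  unfold blocks_to_1D
  rw [pyRange_mul hbN sN hs, pyRange_mul wbN sN hs, pyRange_cast sN]
  simp only [List.foldl_map]
  rw [foldl_counter_grid (fun d c k j =>
    (List.range sN).foldl (fun (d : List Int) (y : Nat) =>
      (List.range sN).foldl (fun (d : List Int) (x : Nat) =>
        PySem.List.pySetD d ((((k * sN : Nat) : Int) + (y : Int)) * ((wbN * sN : Nat) : Int) + (((j * sN : Nat) : Int) + (x : Int)))
          (PySem.List.pyGetD (PySem.List.pyGetD (PySem.List.pyGetD blocks c []) (y : Int) []) (x : Int) 0)) d) d) wbN hbN]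
  have hM : (((hbN * sN : Nat) : Int) * ((wbN * sN : Nat) : Int)).toNat = hbN * sN * (wbN * sN) := by
    rw [← Nat.cast_mul, Int.toNat_natCast]
  rw [hM]
  have hflat : (wEntries blocks hbN wbN sN).foldl (fun d iv => PySem.List.pySetD d iv.1 iv.2)
      (List.replicate (hbN * sN * (wbN * sN)) 0) =
      List.foldl
        (fun (d : List Int) (k : Nat) =>
          List.foldl
            (fun (d : List Int) (j : Nat) =>
              List.foldl
                (fun (d : List Int) (y : Nat) =>
                  List.foldl
                    (fun (d : List Int) (x : Nat) =>
                      PySem.List.pySetD d ((((k * sN : Nat) : Int) + (y : Int)) * ((wbN * sN : Nat) : Int) + (((j * sN : Nat) : Int) + (x : Int)))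
                        (PySem.List.pyGetD (PySem.List.pyGetD (PySem.List.pyGetD blocks (0 + ((k * wbN + j : Nat) : Int)) []) (y : Int) [])
                          (x : Int) 0))
                    d (List.range sN))
                d (List.range sN))
            d (List.range wbN))
        (List.replicate (hbN * sN * (wbN * sN)) 0) (List.range hbN) := by
    simp only [wEntries, List.foldl_flatMap, List.foldl_map]
  rw [← hflat]
  have hcond : ∀ iv ∈ wEntries blocks hbN wbN sN, 0 ≤ iv.1 ∧
      iv.1.toNat < (List.replicate (hbN * sN * (wbN * sN)) (0 : Int)).length ∧
      iv.2 = pvPix blocks wbN sN iv.1.toNat := by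
    intro iv hiv
    obtain ⟨a, b, c⟩ := wEntries_cond blocks hbN wbN sN hs iv hiv
    exact ⟨a, by simpa using b, c⟩
  apply List.ext_getElem?
  intro p
  rw [foldl_pySetD_graph (pvPix blocks wbN sN) _ _ hcond p]
  by_cases hp : p < hbN * sN * (wbN * sN)
  · rw [if_pos (wEntries_cover blocks hbN wbN sN hs p hp)]
    rw [List.getElem?_map, List.getElem?_range hp]
    rfl
  · rw [if_neg ?hne]
    case hne =>
      rintro ⟨iv, hiv, hivp⟩
      obtain ⟨-, b, -⟩ := wEntries_cond blocks hbN wbN sN hs iv hiv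
      omega
    rw [List.getElem?_eq_none (by simpa using by omega),
      List.getElem?_eq_none (by simp; omega)]

theorem B_eq_gather (blocks : List (List (List Int))) (hbN wbN sN : Nat) (hs : 0 < sN) :
    blocks_to_1D_alt blocks ((hbN * sN : Nat) : Int) ((wbN * sN : Nat) : Int) ((sN : Nat) : Int)
      = (List.range (hbN * sN * (wbN * sN))).map (pvPix blocks wbN sN) := by
  unfold blocks_to_1D_alt
  rcases Nat.eq_zero_or_pos (hbN * sN * (wbN * sN)) with hz | hpos
  · rw [if_pos (by
      rcases Nat.mul_eq_zero.1 hz with h | h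
      · exact Or.inl (by exact_mod_cast Nat.le_of_eq h)
      · exact Or.inr (by exact_mod_cast Nat.le_of_eq h)), hz]
    simp
  · have h1 : 0 < hbN * sN := by
      rcases Nat.eq_zero_or_pos (hbN * sN) with h | h
      · simp [h] at hpos
      · exact h
    have h2 : 0 < wbN * sN := by
      rcases Nat.eq_zero_or_pos (wbN * sN) with h | h
      · simp [h] at hpos
      · exact h
    rw [if_neg (by rintro (hle | hle) <;> omega)]
    rw [show ((hbN * sN : Nat) : Int) * ((wbN * sN : Nat) : Int) = ((hbN * sN * (wbN * sN) : Nat) : Int) from by push_cast; ring]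
    rw [pyRange_cast, List.map_map]
    apply List.map_congr_left
    intro p _
    simp only [Function.comp_apply, PySem.Int.floordiv_natCast, PySem.Int.mod_natCast,
      Nat.mul_div_cancel _ hs, pvPix]
    congr 2

theorem pyRange_empty (b s : Int) (h : (0 < s ∧ b ≤ 0) ∨ (s < 0 ∧ 0 ≤ b)) :
    PySem.List.pyRange 0 b s = [] := by
  unfold PySem.List.pyRange
  rcases h with ⟨h1, h2⟩ | ⟨h1, h2⟩ <;> split_ifs <;> simp_all <;> omega

theorem A_deg (blocks : List (List (List Int))) (height width block_size : Int)
    (hbs : block_size ≠ 0) (h0 : (height ≤ 0 ∧ 0 ≤ width) ∨ (0 ≤ height ∧ width ≤ 0)) :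
    blocks_to_1D blocks height width block_size = [] := by
  have hd : (height * width).toNat = 0 := by
    rcases h0 with ⟨h1, h2⟩ | ⟨h1, h2⟩
    · exact Int.toNat_of_nonpos (Int.mul_nonpos_of_nonpos_of_nonneg h1 h2)
    · exact Int.toNat_of_nonpos (Int.mul_nonpos_of_nonneg_of_nonpos h1 h2)
  have hempty : PySem.List.pyRange 0 height block_size = [] ∨
      PySem.List.pyRange 0 width block_size = [] := by
    rcases Int.lt_or_lt_of_ne hbs with hneg | hpos
    · rcases h0 with ⟨h1, h2⟩ | ⟨h1, h2⟩
      · rcases le_or_gt 0 height with hh | hh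
        · exact Or.inl (pyRange_empty _ _ (Or.inr ⟨hneg, hh⟩))
        · exact Or.inr (pyRange_empty _ _ (Or.inr ⟨hneg, h2⟩))
      · exact Or.inl (pyRange_empty _ _ (Or.inr ⟨hneg, h1⟩))
    · rcases h0 with ⟨h1, h2⟩ | ⟨h1, h2⟩
      · exact Or.inl (pyRange_empty _ _ (Or.inl ⟨hpos, h1⟩))
      · exact Or.inr (pyRange_empty _ _ (Or.inl ⟨hpos, h2⟩))
  unfold blocks_to_1D
  rcases hempty with he | he <;> rw [he]
  · simp [hd]
  · simp only [List.foldl_nil, hd, List.replicate_zero]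
    rw [foldl_fixed']

theorem B_deg (blocks : List (List (List Int))) (height width block_size : Int)
    (h0 : height ≤ 0 ∨ width ≤ 0) :
    blocks_to_1D_alt blocks height width block_size = [] := by
  unfold blocks_to_1D_alt
  rw [if_pos h0]

-- ===== VERDICT (by name: the statement is the Claim_ definition above) =====
theorem blocks_to_1D_spec : Claim_equal_blocks_to_1D := by
  intro blocks height width block_size _hdom hpre
  obtain ⟨hbs, hcase⟩ := hpre
  show blocks_to_1D blocks height width block_size = blocks_to_1D_alt blocks height width block_size
  rcases hcase with h0 | h0 | ⟨hbsp, hhp, hwp, hdh, hdw, -, -⟩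
  · rw [A_deg blocks _ _ _ hbs (Or.inl h0), B_deg blocks _ _ _ (Or.inl h0.1)]
  · rw [A_deg blocks _ _ _ hbs (Or.inr h0), B_deg blocks _ _ _ (Or.inr h0.2)]
  · have hsN : 0 < block_size.toNat := by omega
    have hbseq : block_size = ((block_size.toNat : Nat) : Int) := by omega
    have hdvdh : block_size.toNat ∣ height.toNat := by
      rw [hbseq, show height = ((height.toNat : Nat) : Int) from by omega,
        Int.natCast_dvd_natCast] at hdh
      exact hdh
    have hdvdw : block_size.toNat ∣ width.toNat := by
      rw [hbseq, show width = ((width.toNat : Nat) : Int) from by omega,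
        Int.natCast_dvd_natCast] at hdw
      exact hdw
    have hH : height = (((height.toNat / block_size.toNat) * block_size.toNat : Nat) : Int) := by
      rw [Nat.div_mul_cancel hdvdh]; omega
    have hW : width = (((width.toNat / block_size.toNat) * block_size.toNat : Nat) : Int) := by
      rw [Nat.div_mul_cancel hdvdw]; omega
    have keyA := A_eq_gather blocks (height.toNat / block_size.toNat) (width.toNat / block_size.toNat) block_size.toNat hsN
    have keyB := B_eq_gather blocks (height.toNat / block_size.toNat) (width.toNat / block_size.toNat) block_size.toNat hsN
    rw [← hH, ← hW, ← hbseq] at keyA keyB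
    exact keyA.trans keyB.symm
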